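-- pv_equiv track=rewrite | github.com/simsang1l/Programmers | python/level2/문자열_압축.py | solution
-- ===== SOURCE A (Python) =====
-- def solution(s):
--     lst = []
--     length = len(s)
--     answer = length
--
--     for i in range(1, length) :
--         start = 0 # idx 용도
--         cnt = 1 # 같은 규칙 세는 용도
--         result = '' #result 비우기
--
--         if length % i == 0 :
--             l = length // i
--         else :
--             l = length // i + 1
--
--         for j in range(l):
--             subset = s[start:start+i]
--             if subset == s[start+i:start+i*2]:
--                 cnt += 1
--             else :
--                 if cnt == 1 :
--                     result += subset
--                 else :
--                     result += (str(cnt) + subset)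
--                 cnt = 1
--
--             start += i
--
--         if answer > len(result):
--             answer = len(result)
--
--     return answer
-- ===== SOURCE B (Python) =====
-- def solution(s):
--     n = len(s)
--     best = n
--     for i in range(1, n):
--         # d[p] = length of the common prefix of s[p:] and s[p+i:]
--         d = [0] * (n + 1)
--         for p in range(n - i - 1, -1, -1):
--             if s[p] == s[p + i]:
--                 d[p] = d[p + 1] + 1
--         total = 0
--         j = 0
--         while j < n:
--             p = j
--             while p + 2 * i <= n and d[p] >= i:
--                 p += i
--             k = (p - j) // i + 1
--             total += min(i, n - j) + (0 if k == 1 else len(str(k)))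
--             j = p + i
--         if total < best:
--             best = total
--     return best
-- ===== Notes on version B (the rewrite author's own statement) =====
-- stated objective: alternative
-- what changed: B never compares string chunks: for each unit length it first builds a suffix-match DP array d (d[p] = common-prefix length of s[p:] and s[p+i:], computed in one backward character pass), then finds run boundaries by integer pointer jumps (chunks at p and p+i are equal iff p+2i<=n and d[p]>=i) and accumulates an integer total, instead of A's per-chunk slice extraction, slice comparison, counter/flush logic and result-string concatenation.
import Mathlib
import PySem

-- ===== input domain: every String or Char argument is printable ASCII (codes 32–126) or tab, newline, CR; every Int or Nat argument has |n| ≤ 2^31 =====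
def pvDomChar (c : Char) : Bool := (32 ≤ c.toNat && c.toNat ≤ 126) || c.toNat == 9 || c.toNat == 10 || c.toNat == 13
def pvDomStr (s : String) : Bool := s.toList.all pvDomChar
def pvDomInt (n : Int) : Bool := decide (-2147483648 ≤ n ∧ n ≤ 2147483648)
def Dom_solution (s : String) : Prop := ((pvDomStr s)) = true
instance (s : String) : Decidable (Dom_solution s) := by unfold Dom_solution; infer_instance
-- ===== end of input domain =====

-- B replaces A's per-chunk slice comparisons and result-string building by, per unit
-- length, a backward suffix-match DP array plus integer pointer jumps (alternative
-- algorithm, same asymptotic cost).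

-- ===== PORT A =====
-- inner loop body of A: state (start, cnt, result); the loop variable j is unused
def stepA (cs : List Char) (i : Int) (st : Int × Int × List Char) (_j : Int) :
    Int × Int × List Char :=
  let start := st.1
  let cnt := st.2.1
  let result := st.2.2
  let subset := PySem.List.slice cs (some start) (some (start + i))
  if subset == PySem.List.slice cs (some (start + i)) (some (start + i * 2)) then
    (start + i, cnt + 1, result)
  else
    (start + i, 1,
      if cnt = 1 then result ++ subset else result ++ (PySem.Int.toChars cnt ++ subset))

-- 'lst = []' in A is unused and not ported
def solution (s : String) : Int :=
  let length : Int := PySem.Str.len s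
  let answer : Int := length
  (PySem.List.pyRange 1 length 1).foldl (fun answer i =>
    let l : Int := if PySem.Int.mod length i = 0 then PySem.Int.floordiv length i
                   else PySem.Int.floordiv length i + 1
    let fin := (PySem.List.pyRange 0 l 1).foldl (stepA s.toList i) (0, 1, [])
    if answer > PySem.Chars.len fin.2.2 then PySem.Chars.len fin.2.2 else answer) answer

-- ===== PORT B =====
-- 'd = [0]*(n+1); for p in range(n-i-1, -1, -1): if s[p]==s[p+i]: d[p] = d[p+1]+1'
-- (s[p], s[p+i] and d[p+1] are always in range in this loop, so pyGet?/getD/.toNat are exact)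
def bD (cs : List Char) (n i : Int) : List Int :=
  (PySem.List.pyRange (n - i - 1) (-1) (-1)).foldl
    (fun d p =>
      if PySem.List.pyGet? cs p == PySem.List.pyGet? cs (p + i) then
        d.set p.toNat (d.getD (p + 1).toNat 0 + 1)
      else d)
    (List.replicate (n + 1).toNat 0)

-- 'while p + 2*i <= n and d[p] >= i: p += i'  ('0 < i' is a totality guard only:
-- every call made by solution_alt has 1 ≤ i, where the guard never fires)
def bInner (d : List Int) (n i p : Int) : Int :=
  if _h : 0 < i ∧ p + 2 * i ≤ n ∧ i ≤ d.getD p.toNat 0 then bInner d n i (p + i) else p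
termination_by (n - p).toNat
decreasing_by omega

-- termination helper for bOuter, cited by its decreasing_by
theorem le_bInner (d : List Int) (n i p : Int) : p ≤ bInner d n i p := by
  fun_induction bInner with
  | case1 p h ih => omega
  | case2 p h => omega

-- the outer 'while j < n' loop of B (same totality guard '0 < i')
def bOuter (d : List Int) (n i total j : Int) : Int :=
  if _h : 0 < i ∧ j < n then
    let p := bInner d n i j
    let k := PySem.Int.floordiv (p - j) i + 1
    bOuter d n i
      (total + min i (n - j) +
        (if k = 1 then 0 else PySem.Chars.len (PySem.Int.toChars k)))
      (p + i)
  else total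
termination_by (n - j).toNat
decreasing_by
  have := le_bInner d n i j
  omega

def solution_alt (s : String) : Int :=
  let cs := s.toList
  let n : Int := cs.length
  (PySem.List.pyRange 1 n 1).foldl (fun best i =>
    let d := bD cs n i
    let total := bOuter d n i 0 0
    if total < best then total else best) n

-- ===== PRECONDITION & SPEC =====
def Spec_solution (s : String) (out : Int) : Prop := out = solution_alt s
instance (s : String) (out : Int) : Decidable (Spec_solution s out) := by unfold Spec_solution; infer_instance

-- ===== CLAIM (what is proved, stated in full; the proofs are below) =====
def Claim_equal_solution : Prop := ∀ (s : String), Dom_solution s → Spec_solution s (solution s)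

-- ===== LEMMAS AND PROOFS =====

-- the chunk list [t[0:i], t[i:2i], …] (meaningful for 1 ≤ i)
def chunksN (i : Nat) : List Char → List (List Char)
  | [] => []
  | x :: t => (x :: t).take i :: chunksN i (t.drop (i - 1))
termination_by l => l.length
decreasing_by simp [List.length_drop]

-- A's inner loop, rephrased on the remaining suffix of the string (fuel = loop count)
def aRunT (i : Nat) : Nat → List Char → Int → List Char → List Char
  | 0, _, _, r => r
  | m + 1, t, cnt, r =>
    if t.take i == (t.drop i).take i then aRunT i m (t.drop i) (cnt + 1) r
    else aRunT i m (t.drop i) 1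
      (if cnt = 1 then r ++ t.take i else r ++ (PySem.Int.toChars cnt ++ t.take i))

-- A's inner loop, rephrased on the chunk list
def aRun : List (List Char) → Int → List Char → List Char
  | [], _, r => r
  | [c], cnt, r => if cnt = 1 then r ++ c else r ++ (PySem.Int.toChars cnt ++ c)
  | c :: c' :: rest, cnt, r =>
    if c == c' then aRun (c' :: rest) (cnt + 1) r
    else aRun (c' :: rest) 1
      (if cnt = 1 then r ++ c else r ++ (PySem.Int.toChars cnt ++ c))

-- number of leading chunks equal to the run head
def runLenB (c : List Char) : List (List Char) → Nat
  | [] => 0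
  | x :: t => if x == c then runLenB c t + 1 else 0

def flushLen (k : Int) (c : List Char) : Int :=
  (c.length : Int) + (if k = 1 then 0 else ((PySem.Int.toChars k).length : Int))

-- compressed length of a chunk list, one recursive step per run
def totalB : List (List Char) → Int
  | [] => 0
  | c :: rest =>
    let lead := runLenB c rest
    let k : Int := (lead : Int) + 1
    ((c.length : Int) + (if k = 1 then 0 else ((PySem.Int.toChars k).length : Int)))
      + totalB (rest.drop lead)
termination_by l => l.length
decreasing_by simp [List.length_drop]

theorem chunksN_cons (i : Nat) (hi : 1 ≤ i) (x : Char) (t : List Char) :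
    chunksN i (x :: t) = (x :: t).take i :: chunksN i ((x :: t).drop i) := by
  obtain ⟨j, rfl⟩ : ∃ j, i = j + 1 := ⟨i - 1, by omega⟩
  simp [chunksN, List.drop_succ_cons]

theorem length_chunksN (i : Nat) (hi : 1 ≤ i) (t : List Char) :
    (chunksN i t).length = (t.length + i - 1) / i := by
  induction t using chunksN.induct (i := i) with
  | case1 => rw [chunksN]; simp; rw [Nat.div_eq_of_lt (by omega)]
  | case2 x t ih =>
    rw [chunksN]
    simp only [List.length_cons, ih, List.length_drop]
    have hR : t.length + 1 + i - 1 = t.length + i := by omega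
    rw [hR, Nat.add_div_right _ (by omega : 0 < i)]
    rcases Nat.lt_or_ge t.length (i - 1) with h | h
    · have hN : t.length - (i - 1) + i - 1 = i - 1 := by omega
      rw [hN, Nat.div_eq_of_lt (by omega), Nat.div_eq_of_lt (by omega)]
    · have hN : t.length - (i - 1) + i - 1 = t.length := by omega
      rw [hN]

theorem foldl_stepA (cs : List Char) (i : Int) (hi : 1 ≤ i) :
    ∀ (xs : List Int) (start cnt : Int) (r : List Char), 0 ≤ start →
      (xs.foldl (stepA cs i) (start, cnt, r)).2.2
        = aRunT i.toNat xs.length (cs.drop start.toNat) cnt r := by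
  intro xs
  induction xs with
  | nil => intro start cnt r _; simp [aRunT]
  | cons x xs ih =>
    intro start cnt r h0
    have hs1 : PySem.List.slice cs (some start) (some (start + i))
        = (cs.drop start.toNat).take i.toNat := by
      rw [PySem.List.slice_toNat cs h0 (by omega)]
      congr 1
      omega
    have hs2 : PySem.List.slice cs (some (start + i)) (some (start + i * 2))
        = ((cs.drop start.toNat).drop i.toNat).take i.toNat := by
      rw [PySem.List.slice_toNat cs (by omega) (by omega), List.drop_drop]
      congr 1
      · omega
      · congr 1
        omega
    have hdd : cs.drop (start + i).toNat = (cs.drop start.toNat).drop i.toNat := by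
      rw [List.drop_drop]
      congr 1
      omega
    rw [List.foldl_cons, List.length_cons, aRunT]
    by_cases hc : ((cs.drop start.toNat).take i.toNat
        == ((cs.drop start.toNat).drop i.toNat).take i.toNat) = true
    · rw [if_pos hc]
      have hstep : stepA cs i (start, cnt, r) x = (start + i, cnt + 1, r) := by
        simp only [stepA, hs1, hs2]
        rw [if_pos hc]
      rw [hstep, ih _ _ _ (by omega), hdd]
    · rw [if_neg hc]
      have hstep : stepA cs i (start, cnt, r) x = (start + i, 1,
          if cnt = 1 then r ++ (cs.drop start.toNat).take i.toNat
          else r ++ (PySem.Int.toChars cnt ++ (cs.drop start.toNat).take i.toNat)) := by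
        simp only [stepA, hs1, hs2]
        rw [if_neg hc]
      rw [hstep, ih _ _ _ (by omega), hdd]

theorem aRunT_eq_aRun (i : Nat) (hi : 1 ≤ i) :
    ∀ (t : List Char) (cnt : Int) (r : List Char),
      aRunT i (chunksN i t).length t cnt r = aRun (chunksN i t) cnt r := by
  intro t
  induction t using chunksN.induct (i := i) with
  | case1 => intro cnt r; simp [chunksN, aRunT, aRun]
  | case2 x t ih =>
    intro cnt r
    have hdrop : (x :: t).drop i = t.drop (i - 1) := by
      obtain ⟨j, rfl⟩ : ∃ j, i = j + 1 := ⟨i - 1, by omega⟩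
      simp
    have htake : (x :: t).take i ≠ [] := by
      obtain ⟨j, rfl⟩ : ∃ j, i = j + 1 := ⟨i - 1, by omega⟩
      simp
    rw [chunksN_cons i hi]
    cases hd : t.drop (i - 1) with
    | nil =>
      rw [hdrop, hd]
      simp only [chunksN, List.length_cons, List.length_nil]
      rw [aRunT, hdrop, hd, List.take_nil]
      rw [if_neg (by simp [htake]), aRunT, aRun]
    | cons y d' =>
      have ih' := ih
      rw [hd] at ih'
      have hcc : chunksN i (y :: d') = (y :: d').take i :: chunksN i ((y :: d').drop i) :=
        chunksN_cons i hi y d'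
      rw [hdrop, hd, List.length_cons, aRunT, hdrop, hd, hcc, aRun, ← hcc]
      by_cases hc : ((x :: t).take i == (y :: d').take i) = true
      · rw [if_pos hc, if_pos hc, ih']
      · rw [if_neg hc, if_neg hc, ih']

theorem totalB_cons (c : List Char) (rest : List (List Char)) :
    totalB (c :: rest)
      = flushLen ((runLenB c rest : Int) + 1) c + totalB (rest.drop (runLenB c rest)) := by
  rw [totalB]
  simp [flushLen]

theorem length_aRun :
    ∀ (rest : List (List Char)) (c : List Char) (cnt : Int) (r : List Char),
      ((aRun (c :: rest) cnt r).length : Int)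
        = (r.length : Int) + flushLen (cnt + (runLenB c rest : Int)) c
            + totalB (rest.drop (runLenB c rest)) := by
  intro rest
  induction rest with
  | nil =>
    intro c cnt r
    simp only [aRun, runLenB, List.drop_nil, totalB, flushLen, Nat.cast_zero, add_zero]
    split_ifs with h1 <;> simp [List.length_append]
    ring
  | cons c' rest' ih =>
    intro c cnt r
    rw [aRun]
    by_cases hc : (c == c') = true
    · have hcc : c = c' := eq_of_beq hc
      subst hcc
      rw [if_pos (by simp), runLenB]
      simp only [beq_self_eq_true, if_true]
      rw [ih, List.drop_succ_cons]
      have : cnt + 1 + (runLenB c rest' : Int) = cnt + ((runLenB c rest' : Nat) + 1 : Nat) := by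
        push_cast; ring
      rw [this]
    · have hcne : c ≠ c' := fun he => hc (by simp [he])
      have hne : (c' == c) = false := beq_eq_false_iff_ne.mpr (Ne.symm hcne)
      rw [if_neg hc, runLenB]
      simp only [hne, Bool.false_eq_true, if_false]
      rw [ih, List.drop_zero, totalB_cons]
      have hflush : (((if cnt = 1 then r ++ c else r ++ (PySem.Int.toChars cnt ++ c)).length : Nat) : Int)
          = (r.length : Int) + flushLen cnt c := by
        split_ifs with h <;> simp [flushLen, List.length_append, h]
        ring
      rw [hflush]
      have h1 : (1 : Int) + (runLenB c' rest' : Int) = (runLenB c' rest' : Int) + 1 := by ring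
      rw [h1]
      simp only [Nat.cast_zero, add_zero]
      ring

theorem ceil_div_eq (n i : Nat) (hi : 1 ≤ i) :
    (n + i - 1) / i = if n % i = 0 then n / i else n / i + 1 := by
  rcases Nat.eq_zero_or_pos n with h0 | h0
  · subst h0
    rw [if_pos (Nat.zero_mod i), Nat.zero_div, Nat.zero_add, Nat.div_eq_of_lt (by omega)]
  · have h1 : n + i - 1 = (n - 1) + i := by omega
    rw [h1, Nat.add_div_right _ (by omega)]
    by_cases h : n % i = 0
    · rw [if_pos h]
      obtain ⟨q, rfl⟩ : ∃ q, n = i * q := (Nat.dvd_of_mod_eq_zero h).elim (fun q hq => ⟨q, hq⟩)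
      have hq1 : 1 ≤ q := by
        rcases Nat.eq_zero_or_pos q with rfl | hq
        · simp at h0
        · exact hq
      have hle : i ≤ i * q := Nat.le_mul_of_pos_right i hq1
      have hsplit : i * q - 1 = i * (q - 1) + (i - 1) := by
        rw [Nat.mul_sub, Nat.mul_one]
        omega
      rw [hsplit, Nat.mul_add_div (by omega), Nat.div_eq_of_lt (by omega),
        Nat.mul_div_cancel_left q (by omega : 0 < i)]
      omega
    · rw [if_neg h]
      have hd := Nat.div_add_mod n i
      have hr1 : 1 ≤ n % i := Nat.pos_of_ne_zero h
      have hrlt : n % i < i := Nat.mod_lt _ (by omega)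
      have hsplit : n - 1 = i * (n / i) + (n % i - 1) := by omega
      rw [hsplit, Nat.mul_add_div (by omega),
        show (n % i - 1) / i = 0 from Nat.div_eq_of_lt (by omega)]

-- chunk list of a suffix, as the suffix of the chunk list
theorem chunksN_drop (i : Nat) (hi : 1 ≤ i) :
    ∀ (m : Nat) (v : List Char), (chunksN i v).drop m = chunksN i (v.drop (i * m)) := by
  intro m
  induction m with
  | zero => intro v; simp
  | succ m ih =>
    intro v
    cases v with
    | nil => simp [chunksN]
    | cons x t =>
      rw [chunksN_cons i hi]
      have : (chunksN i ((x :: t).drop i)).drop m = chunksN i (((x :: t).drop i).drop (i * m)) :=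
        ih _
      rw [List.drop_succ_cons, this, List.drop_drop]
      congr 2
      ring

-- ==== B-side: the suffix-match DP and the pointer jumps ====

-- common prefix length of two lists
def cpl : List Char → List Char → Nat
  | x :: xs, y :: ys => if x = y then cpl xs ys + 1 else 0
  | _, _ => 0

theorem cpl_nil_right (xs : List Char) : cpl xs [] = 0 := by
  cases xs <;> rfl

theorem take_eq_iff_cpl :
    ∀ (i : Nat) (xs ys : List Char), i ≤ xs.length → i ≤ ys.length →
      (xs.take i = ys.take i ↔ i ≤ cpl xs ys) := by
  intro i
  induction i with
  | zero => intro xs ys _ _; simp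
  | succ i ih =>
    intro xs ys hx hy
    cases xs with
    | nil => simp at hx
    | cons x xs =>
      cases ys with
      | nil => simp at hy
      | cons y ys =>
        simp only [List.take_succ_cons, List.cons_eq_cons, cpl]
        by_cases hxy : x = y
        · rw [if_pos hxy]
          constructor
          · rintro ⟨_, ht⟩
            have := (ih xs ys (by simpa using hx) (by simpa using hy)).mp ht
            omega
          · intro hle
            exact ⟨hxy, (ih xs ys (by simpa using hx) (by simpa using hy)).mpr (by omega)⟩
        · rw [if_neg hxy]
          constructor
          · rintro ⟨he, _⟩; exact absurd he hxy
          · intro hle; omega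

theorem drop_cons_getElem (cs : List Char) (p : Nat) (hp : p < cs.length) :
    cs.drop p = cs[p] :: cs.drop (p + 1) := by
  rw [List.drop_eq_getElem_cons hp]

theorem getD_replicate_zero (k q : Nat) : (List.replicate k (0 : Int)).getD q 0 = 0 := by
  by_cases h : q < k
  · exact List.getD_replicate _ h
  · rw [List.getD_eq_getElem?_getD, List.getElem?_eq_none (by simpa using Nat.le_of_not_lt h)]
    rfl

-- invariant of the backward DP pass
theorem bD_fold_inv (cs : List Char) (iN : Nat) (hi : 1 ≤ iN) :
    ∀ (m : Nat), m + iN ≤ cs.length →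
      ∀ (d : List Int), d.length = cs.length + 1 →
        (∀ q : Nat, m ≤ q → d.getD q 0 = (cpl (cs.drop q) (cs.drop (q + iN)) : Int)) →
        (∀ q : Nat, q < m → d.getD q 0 = 0) →
        ∀ q : Nat,
          ((PySem.List.pyRange ((m : Int) - 1) (-1) (-1)).foldl
            (fun d p =>
              if PySem.List.pyGet? cs p == PySem.List.pyGet? cs (p + (iN : Int)) then
                d.set p.toNat (d.getD (p + 1).toNat 0 + 1)
              else d) d).getD q 0
            = (cpl (cs.drop q) (cs.drop (q + iN)) : Int) := by
  intro m
  induction m with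
  | zero =>
    intro _ d _ hhi _ q
    rw [PySem.List.pyRange_neg_one_eq_nil (by omega)]
    exact hhi q (Nat.zero_le q)
  | succ m ih =>
    intro hm d hlen hhi hlo q
    have hmlt : m < cs.length := by omega
    have hmi : m + iN < cs.length := by omega
    rw [show ((m + 1 : Nat) : Int) - 1 = (m : Int) by push_cast; ring]
    rw [PySem.List.pyRange_neg_one_cons (by omega : (-1 : Int) < (m : Int)), List.foldl_cons]
    have hg1 : PySem.List.pyGet? cs ((m : Nat) : Int) = some cs[m] := by
      rw [PySem.List.pyGet?_natCast, List.getElem?_eq_getElem hmlt]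
    have hg2 : PySem.List.pyGet? cs ((m : Int) + (iN : Int)) = some cs[m + iN] := by
      rw [show ((m : Int) + (iN : Int)) = ((m + iN : Nat) : Int) by push_cast; ring,
        PySem.List.pyGet?_natCast, List.getElem?_eq_getElem hmi]
    have hdm : cs.drop m = cs[m] :: cs.drop (m + 1) := drop_cons_getElem cs m hmlt
    have hdmi : cs.drop (m + iN) = cs[m + iN] :: cs.drop (m + 1 + iN) := by
      rw [drop_cons_getElem cs (m + iN) hmi, show m + iN + 1 = m + 1 + iN by omega]
    by_cases hceq : cs[m] = cs[m + iN]
    · have hbeq : (PySem.List.pyGet? cs ((m : Nat) : Int)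
          == PySem.List.pyGet? cs ((m : Int) + (iN : Int))) = true := by
        rw [hg1, hg2, hceq]
        simp
      rw [hbeq, if_pos rfl]
      have ht1 : (((m : Nat) : Int)).toNat = m := Int.toNat_natCast m
      have ht2 : (((m : Nat) : Int) + 1).toNat = m + 1 := by omega
      rw [ht1, ht2]
      have hcplm : cpl (cs.drop m) (cs.drop (m + iN))
          = cpl (cs.drop (m + 1)) (cs.drop (m + 1 + iN)) + 1 := by
        rw [hdm, hdmi, cpl, if_pos hceq]
      have hset : m < d.length := by omega
      refine ih (by omega) _ (by rw [List.length_set]; exact hlen) ?_ ?_ q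
      · intro q' hq'
        by_cases hqm : q' = m
        · subst hqm
          rw [List.getD_eq_getElem?_getD, List.getElem?_set_self hset, Option.getD_some,
            hhi (q' + 1) (by omega), hcplm]
          push_cast
          ring
        · rw [List.getD_eq_getElem?_getD, List.getElem?_set_ne (by omega : m ≠ q'),
            ← List.getD_eq_getElem?_getD]
          exact hhi q' (by omega)
      · intro q' hq'
        rw [List.getD_eq_getElem?_getD, List.getElem?_set_ne (by omega : m ≠ q'),
          ← List.getD_eq_getElem?_getD]
        exact hlo q' (by omega)
    · have hbeq : (PySem.List.pyGet? cs ((m : Nat) : Int)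
          == PySem.List.pyGet? cs ((m : Int) + (iN : Int))) = false := by
        rw [hg1, hg2]
        simpa using hceq
      rw [hbeq]
      simp only [Bool.false_eq_true, if_false]
      refine ih (by omega) d hlen ?_ ?_ q
      · intro q' hq'
        by_cases hqm : q' = m
        · subst hqm
          rw [hlo q' (by omega)]
          rw [hdm, hdmi, cpl, if_neg hceq]
          simp
        · exact hhi q' (by omega)
      · intro q' hq'
        exact hlo q' (by omega)

theorem bD_getD (cs : List Char) (iN : Nat) (hi : 1 ≤ iN) (q : Nat) :
    (bD cs (cs.length : Int) (iN : Int)).getD q 0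
      = (cpl (cs.drop q) (cs.drop (q + iN)) : Int) := by
  unfold bD
  have hrep : ((cs.length : Int) + 1).toNat = cs.length + 1 := by omega
  by_cases hcase : iN < cs.length
  · rw [show (cs.length : Int) - (iN : Int) - 1 = ((cs.length - iN : Nat) : Int) - 1 by omega]
    refine bD_fold_inv cs iN hi (cs.length - iN) (by omega) _ ?_ ?_ ?_ q
    · rw [hrep, List.length_replicate]
    · intro q' hq'
      rw [getD_replicate_zero]
      rw [List.drop_eq_nil_of_le (show cs.length ≤ q' + iN by omega), cpl_nil_right]
      rfl
    · intro q' _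
      exact getD_replicate_zero _ q'
  · rw [PySem.List.pyRange_neg_one_eq_nil (by omega : (cs.length : Int) - iN - 1 ≤ -1),
      List.foldl_nil, getD_replicate_zero,
      List.drop_eq_nil_of_le (show cs.length ≤ q + iN by omega), cpl_nil_right]
    rfl

-- the inner while loop finds the end of the current run
theorem bInner_eq (cs : List Char) (iN : Nat) (hi : 1 ≤ iN) (d : List Int)
    (hd : ∀ q : Nat, d.getD q 0 = (cpl (cs.drop q) (cs.drop (q + iN)) : Int)) :
    ∀ (fuel jN : Nat), cs.length ≤ jN + fuel →
      bInner d (cs.length : Int) (iN : Int) (jN : Int)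
        = ((jN + iN * runLenB ((cs.drop jN).take iN) (chunksN iN (cs.drop (jN + iN))) : Nat) : Int) := by
  intro fuel
  induction fuel with
  | zero =>
    intro jN hj
    rw [bInner, dif_neg (by rintro ⟨-, h2, -⟩; omega)]
    rw [List.drop_eq_nil_of_le (show cs.length ≤ jN + iN by omega)]
    simp [chunksN, runLenB]
  | succ fuel ih =>
    intro jN hj
    rw [bInner]
    by_cases hcond : 0 < ((iN : Nat) : Int) ∧ ((jN : Nat) : Int) + 2 * ((iN : Nat) : Int) ≤ (cs.length : Int)
        ∧ ((iN : Nat) : Int) ≤ d.getD (((jN : Nat) : Int)).toNat 0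
    · rw [dif_pos hcond]
      obtain ⟨-, h2, h3⟩ := hcond
      have h2' : jN + 2 * iN ≤ cs.length := by omega
      have hcpl : iN ≤ cpl (cs.drop jN) (cs.drop (jN + iN)) := by
        rw [Int.toNat_natCast, hd jN] at h3
        exact_mod_cast h3
      have hlen1 : iN ≤ (cs.drop jN).length := by
        rw [List.length_drop]
        omega
      have hlen2 : iN ≤ (cs.drop (jN + iN)).length := by
        rw [List.length_drop]
        omega
      have heqtake : (cs.drop jN).take iN = (cs.drop (jN + iN)).take iN :=
        (take_eq_iff_cpl iN _ _ hlen1 hlen2).mpr hcpl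
      have hne : cs.drop (jN + iN) ≠ [] := by
        intro h
        have := congrArg List.length h
        rw [List.length_drop] at this
        simp at this
        omega
      obtain ⟨x, t, hu⟩ : ∃ x t, cs.drop (jN + iN) = x :: t := by
        cases hu : cs.drop (jN + iN) with
        | nil => exact absurd hu hne
        | cons x t => exact ⟨x, t, rfl⟩
      have hdd : (cs.drop (jN + iN)).drop iN = cs.drop (jN + 2 * iN) := by
        rw [List.drop_drop]
        congr 1
        omega
      have hchunks : chunksN iN (cs.drop (jN + iN))
          = (cs.drop (jN + iN)).take iN :: chunksN iN (cs.drop (jN + 2 * iN)) := by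
        rw [hu, chunksN_cons iN hi, ← hu, hdd]
      rw [hchunks, runLenB, if_pos (by rw [← heqtake]; exact beq_self_eq_true _)]
      have hrec := ih (jN + iN) (by omega)
      rw [show ((jN : Nat) : Int) + ((iN : Nat) : Int) = ((jN + iN : Nat) : Int) by push_cast; ring,
        hrec, show jN + iN + iN = jN + 2 * iN by omega, heqtake]
      push_cast
      ring
    · rw [dif_neg hcond]
      suffices hz : runLenB ((cs.drop jN).take iN) (chunksN iN (cs.drop (jN + iN))) = 0 by
        rw [hz]
        omega
      push_neg at hcond
      have h1 : (0 : Int) < ((iN : Nat) : Int) := by exact_mod_cast hi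
      have hrest := hcond h1
      by_cases h2 : ((jN : Nat) : Int) + 2 * ((iN : Nat) : Int) ≤ (cs.length : Int)
      · have h3 := hrest h2
        rw [Int.toNat_natCast, hd jN] at h3
        have hcpl : cpl (cs.drop jN) (cs.drop (jN + iN)) < iN := by omega
        have h2' : jN + 2 * iN ≤ cs.length := by omega
        have hlen1 : iN ≤ (cs.drop jN).length := by
          rw [List.length_drop]
          omega
        have hlen2 : iN ≤ (cs.drop (jN + iN)).length := by
          rw [List.length_drop]
          omega
        have hnetake : (cs.drop (jN + iN)).take iN ≠ (cs.drop jN).take iN := by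
          intro he
          have := (take_eq_iff_cpl iN _ _ hlen1 hlen2).mp he.symm
          omega
        cases hu : cs.drop (jN + iN) with
        | nil => simp [chunksN, runLenB]
        | cons x t =>
          rw [chunksN_cons iN hi, runLenB,
            if_neg (by rw [← hu]; simpa using hnetake)]
      · have h2' : cs.length < jN + 2 * iN := by omega
        by_cases h4 : cs.length ≤ jN + iN
        · rw [List.drop_eq_nil_of_le h4]
          simp [chunksN, runLenB]
        · cases hu : cs.drop (jN + iN) with
          | nil => simp [chunksN, runLenB]
          | cons x t =>
            rw [chunksN_cons iN hi, runLenB, if_neg]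
            rw [← hu]
            simp only [beq_iff_eq]
            intro he
            have hl := congrArg List.length he
            rw [List.length_take, List.length_take, List.length_drop, List.length_drop] at hl
            omega

-- the outer while loop computes totalB of the chunk list of the remaining suffix
theorem bOuter_eq (cs : List Char) (iN : Nat) (hi : 1 ≤ iN) (d : List Int)
    (hd : ∀ q : Nat, d.getD q 0 = (cpl (cs.drop q) (cs.drop (q + iN)) : Int)) :
    ∀ (fuel jN : Nat) (total : Int), cs.length ≤ jN + fuel →
      bOuter d (cs.length : Int) (iN : Int) total (jN : Int)
        = total + totalB (chunksN iN (cs.drop jN)) := by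
  intro fuel
  induction fuel with
  | zero =>
    intro jN total hj
    rw [bOuter, dif_neg (by rintro ⟨-, h2⟩; omega)]
    rw [List.drop_eq_nil_of_le (by omega)]
    simp [chunksN, totalB]
  | succ fuel ih =>
    intro jN total hj
    by_cases hjlt : jN < cs.length
    · rw [bOuter, dif_pos ⟨by exact_mod_cast hi, by exact_mod_cast hjlt⟩]
      have hbi : bInner d (cs.length : Int) (iN : Int) ((jN : Nat) : Int)
          = ((jN + iN * runLenB ((cs.drop jN).take iN) (chunksN iN (cs.drop (jN + iN))) : Nat) : Int) :=
        bInner_eq cs iN hi d hd cs.length jN (by omega)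
      set lead := runLenB ((cs.drop jN).take iN) (chunksN iN (cs.drop (jN + iN))) with hlead
      rw [hbi]
      have hk : PySem.Int.floordiv (((jN + iN * lead : Nat) : Int) - ((jN : Nat) : Int)) ((iN : Nat) : Int) + 1
          = ((lead : Nat) : Int) + 1 := by
        rw [show ((jN + iN * lead : Nat) : Int) - ((jN : Nat) : Int) = ((iN * lead : Nat) : Int) by
          push_cast; ring]
        rw [PySem.Int.floordiv_natCast, Nat.mul_div_cancel_left lead (by omega)]
      simp only [hk]
      have hne : cs.drop jN ≠ [] := by
        intro h
        have := congrArg List.length h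
        rw [List.length_drop] at this
        simp at this
        omega
      obtain ⟨x, t, hu⟩ : ∃ x t, cs.drop jN = x :: t := by
        cases hu : cs.drop jN with
        | nil => exact absurd hu hne
        | cons x t => exact ⟨x, t, rfl⟩
      have hdd : (cs.drop jN).drop iN = cs.drop (jN + iN) := by
        rw [List.drop_drop]
      have hch : chunksN iN (cs.drop jN)
          = (cs.drop jN).take iN :: chunksN iN (cs.drop (jN + iN)) := by
        rw [hu, chunksN_cons iN hi, ← hu, hdd]
      rw [hch, totalB_cons, ← hlead]
      have hdroplead : (chunksN iN (cs.drop (jN + iN))).drop lead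
          = chunksN iN (cs.drop (jN + iN * (lead + 1))) := by
        rw [chunksN_drop iN hi lead, List.drop_drop]
        all_goals congr 1
        all_goals ring_nf
      rw [hdroplead]
      have hrec := ih (jN + iN * (lead + 1))
        (total + min ((iN : Nat) : Int) ((cs.length : Int) - ((jN : Nat) : Int)) +
          (if ((lead : Nat) : Int) + 1 = 1 then 0
           else PySem.Chars.len (PySem.Int.toChars (((lead : Nat) : Int) + 1))))
        (by
          have hpos : 0 < iN * (lead + 1) := Nat.mul_pos (by omega) (by omega)
          omega)
      rw [show ((jN + iN * lead : Nat) : Int) + ((iN : Nat) : Int)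
          = ((jN + iN * (lead + 1) : Nat) : Int) by push_cast; ring, hrec]
      have hminlen : min ((iN : Nat) : Int) ((cs.length : Int) - ((jN : Nat) : Int))
          = (((cs.drop jN).take iN).length : Int) := by
        rw [List.length_take, List.length_drop]
        omega
      rw [hminlen, flushLen, PySem.Chars.len_eq]
      ring
    · rw [bOuter, dif_neg (by rintro ⟨-, h2⟩; omega)]
      rw [List.drop_eq_nil_of_le (by omega)]
      simp [chunksN, totalB]

-- ==== per-unit-length equality of the two inner computations ====

theorem innerA_eq (cs : List Char) (i : Int) (hi : 1 ≤ i) :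
    PySem.Chars.len (((PySem.List.pyRange 0
        (if PySem.Int.mod (cs.length : Int) i = 0 then PySem.Int.floordiv (cs.length : Int) i
         else PySem.Int.floordiv (cs.length : Int) i + 1) 1).foldl (stepA cs i) (0, 1, [])).2.2)
      = totalB (chunksN i.toNat cs) := by
  obtain ⟨iN, rfl⟩ : ∃ iN : Nat, i = (iN : Int) := ⟨i.toNat, (Int.toNat_of_nonneg (by omega)).symm⟩
  have hiN : 1 ≤ iN := by exact_mod_cast hi
  have hceil : (if PySem.Int.mod (cs.length : Int) (iN : Int) = 0
        then PySem.Int.floordiv (cs.length : Int) (iN : Int)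
        else PySem.Int.floordiv (cs.length : Int) (iN : Int) + 1)
      = (((cs.length + iN - 1) / iN : Nat) : Int) := by
    rw [PySem.Int.mod_natCast, PySem.Int.floordiv_natCast, ceil_div_eq cs.length iN hiN]
    split_ifs with h h' h' <;> push_cast at h h' ⊢ <;> omega
  rw [hceil, foldl_stepA cs (iN : Int) hi _ 0 1 [] le_rfl]
  have hlen : (PySem.List.pyRange 0 (((cs.length + iN - 1) / iN : Nat) : Int) 1).length
      = (chunksN iN cs).length := by
    rw [PySem.List.length_pyRange_one, length_chunksN iN hiN, Int.sub_zero, Int.toNat_natCast]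
  rw [hlen]
  simp only [Int.toNat_natCast, Int.toNat_zero, List.drop_zero]
  rw [aRunT_eq_aRun iN hiN cs 1 []]
  rcases hch : chunksN iN cs with _ | ⟨c, rest⟩
  · simp [aRun, totalB, PySem.Chars.len]
  · rw [PySem.Chars.len_eq, length_aRun rest c 1 [], totalB_cons]
    simp only [List.length_nil, Nat.cast_zero, zero_add]
    rw [add_comm (1 : Int) ((runLenB c rest : Nat) : Int)]

theorem innerB_eq (cs : List Char) (i : Int) (hi : 1 ≤ i) :
    bOuter (bD cs (cs.length : Int) i) (cs.length : Int) i 0 0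
      = totalB (chunksN i.toNat cs) := by
  obtain ⟨iN, rfl⟩ : ∃ iN : Nat, i = (iN : Int) := ⟨i.toNat, (Int.toNat_of_nonneg (by omega)).symm⟩
  have hiN : 1 ≤ iN := by exact_mod_cast hi
  have hd := bD_getD cs iN hiN
  have h := bOuter_eq cs iN hiN _ hd cs.length 0 0 (by omega)
  simpa using h

-- ===== VERDICT (by name: the statement is the Claim_ definition above) =====
theorem solution_spec : Claim_equal_solution := by
  intro s _dom
  unfold Spec_solution solution solution_alt
  simp only [PySem.Str.len_eq]
  apply PySem.List.foldl_congr_mem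
  intro acc i hmem
  rw [PySem.List.mem_pyRange_one] at hmem
  rw [innerA_eq s.toList i hmem.1, innerB_eq s.toList i hmem.1]
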